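-- pv_equiv track=rewrite | github.com/mauwqq/AyED1 | TPs/TP7/E10.py | sum_matrix
-- ===== SOURCE A (Python) =====
-- from typing import List
--
-- def sum_matrix(m: List[List[int]], row: int = 0, col: int = 0) -> int:
--     """Sums the matrix given, recursively.
--
--     Pre: m is a matrix, a list of lists with integers.
--          row is a non-negative integer, values 0 by default.
--          col is a non-negative integer, values 0 by default.
--
--     Post: Returns the sum of the matrix, an integer.
--
--     Raises: ValueError: if m is empty.
--
--     """
--     if not m:
--         raise ValueError("La matriz esta vacia.")
--     if row == len(m):
--         return 0
--     if col == len(m[row]):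
--         return sum_matrix(m, row + 1, 0)
--     return m[row][col] + sum_matrix(m, row, col + 1)
-- ===== SOURCE B (Python) =====
-- from typing import List
--
-- def sum_matrix(m: List[List[int]], row: int = 0, col: int = 0) -> int:
--     """Sums the matrix iteratively: the starting row from `col` on,
--     then every following row in full.
--
--     Raises: ValueError: if m is empty.
--     """
--     if not m:
--         raise ValueError("La matriz esta vacia.")
--     if row == len(m):
--         return 0
--     total = sum(m[row][c] for c in range(col, len(m[row])))
--     for r in range(row + 1, len(m)):
--         total += sum(m[r])
--     return total
-- ===== Notes on version B (the rewrite author's own statement) =====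
-- stated objective: idiomatic
-- what changed: Replaced A's element-by-element recursion (one call per matrix cell) with an iterative computation: the starting row is summed from col by a generator-sum, every following row by sum(m[r]) in a for-loop.
import Mathlib
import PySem

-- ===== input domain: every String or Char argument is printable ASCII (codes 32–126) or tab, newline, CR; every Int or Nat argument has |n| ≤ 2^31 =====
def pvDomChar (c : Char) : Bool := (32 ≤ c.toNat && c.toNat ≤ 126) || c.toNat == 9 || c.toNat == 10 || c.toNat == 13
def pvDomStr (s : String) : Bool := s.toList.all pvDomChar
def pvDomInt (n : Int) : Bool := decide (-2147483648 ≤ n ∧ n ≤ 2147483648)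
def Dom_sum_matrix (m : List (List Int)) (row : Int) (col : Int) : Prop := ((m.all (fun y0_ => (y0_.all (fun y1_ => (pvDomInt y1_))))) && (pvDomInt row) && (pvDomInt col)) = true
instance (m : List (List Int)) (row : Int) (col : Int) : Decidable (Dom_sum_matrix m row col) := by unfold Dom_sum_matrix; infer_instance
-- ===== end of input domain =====

-- B replaces A's per-cell recursion by an iterative computation: the starting row summed from col, then sum(m[r]) per remaining row (idiomatic).
-- A raises on some inputs (ValueError on [], IndexError on out-of-range row/col); exactly those lie outside Pre_.

-- ===== PORT A =====
-- A's recursion steps one cell at a time; the Nat fuel is a totality guard only: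
-- pvFuel_sum_matrix is proved sufficient on all of Pre_, where the Python recursion terminates.
def pvMaxLen_sum_matrix (m : List (List Int)) : Nat := (m.map List.length).foldl max 0

def pvFuel_sum_matrix (m : List (List Int)) (col : Int) : Nat :=
  2 * m.length * (pvMaxLen_sum_matrix m + 2) + 1 + pvMaxLen_sum_matrix m + col.natAbs

def sumFuelA (fuel : Nat) (m : List (List Int)) (row : Int) (col : Int) : Int :=
  match fuel with
  | 0 => 0
  | fuel + 1 =>
    if row = (m.length : Int) then 0
    else if col = ((PySem.List.pyGetD m row []).length : Int) then  -- m[row]; Pre_ keeps row in range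
      sumFuelA fuel m (row + 1) 0
    else
      PySem.List.pyGetD (PySem.List.pyGetD m row []) col 0 + sumFuelA fuel m row (col + 1)

def sum_matrix (m : List (List Int)) (row : Int) (col : Int) : Int :=
  if m = [] then 0        -- Python: raise ValueError (excluded by Pre_)
  else sumFuelA (pvFuel_sum_matrix m col) m row col

-- ===== PORT B =====
def sum_matrix_alt (m : List (List Int)) (row : Int) (col : Int) : Int :=
  if m = [] then 0        -- Python: raise ValueError (excluded by Pre_)
  else if row = (m.length : Int) then 0
  else
    -- total = sum(m[row][c] for c in range(col, len(m[row])))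
    let first := PySem.List.pyGetD m row []
    let total := (PySem.List.pyRange col (first.length : Int) 1).foldl
      (fun t c => t + PySem.List.pyGetD first c 0) 0
    -- for r in range(row + 1, len(m)): total += sum(m[r])
    (PySem.List.pyRange (row + 1) (m.length : Int) 1).foldl
      (fun t r => t + (PySem.List.pyGetD m r []).sum) total

-- ===== PRECONDITION & SPEC =====
-- Pre_ is exactly the set of inputs on which Python A returns: nonempty matrix, row within
-- Python index range of m (or equal to len(m)), and, when a row is selected, col within
-- Python index range of that row (or equal to its length).
def Pre_sum_matrix (m : List (List Int)) (row : Int) (col : Int) : Prop :=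
  m ≠ [] ∧ -(m.length : Int) ≤ row ∧ row ≤ (m.length : Int) ∧
  (row < (m.length : Int) →
    -(((PySem.List.pyGetD m row []).length : Int)) ≤ col ∧
    col ≤ ((PySem.List.pyGetD m row []).length : Int))
instance (m : List (List Int)) (row : Int) (col : Int) : Decidable (Pre_sum_matrix m row col) := by
  unfold Pre_sum_matrix; infer_instance

def pvWitness_sum_matrix : List (List Int) × Int × Int := ([[1, 2], [3]], 0, 0)

def Spec_sum_matrix (m : List (List Int)) (row : Int) (col : Int) (out : Int) : Prop := out = sum_matrix_alt m row col
instance (m : List (List Int)) (row : Int) (col : Int) (out : Int) : Decidable (Spec_sum_matrix m row col out) := by unfold Spec_sum_matrix; infer_instance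

-- ===== CLAIM (what is proved, stated in full; the proofs are below) =====
def Claim_equal_sum_matrix : Prop := ∀ (m : List (List Int)) (row : Int) (col : Int), Dom_sum_matrix m row col → Pre_sum_matrix m row col → Spec_sum_matrix m row col (sum_matrix m row col)

-- ===== LEMMAS AND PROOFS =====

-- number of recursion steps A needs from state (row, col); used to discharge the fuel guard
def pvNeed (m : List (List Int)) (row : Int) (col : Int) : Nat :=
  ((m.length : Int) - row).toNat * (pvMaxLen_sum_matrix m + 2) + 1 +
    (((PySem.List.pyGetD m row []).length : Int) - col).toNat

lemma pyGetD_len_le_maxLen (m : List (List Int)) (i : Int) :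
    (PySem.List.pyGetD m i []).length ≤ pvMaxLen_sum_matrix m := by
  rcases h : PySem.List.pyGet? m i with _ | r
  · simp [PySem.List.pyGetD, h]
  · have hr : r ∈ m := PySem.List.mem_of_pyGet?_eq_some (xs := m) (i := i) h
    have : PySem.List.pyGetD m i [] = r := by simp [PySem.List.pyGetD, h]
    rw [this, pvMaxLen_sum_matrix]
    exact (PySem.List.le_foldl_max (m.map List.length) 0).2 _ (List.mem_map_of_mem hr)

lemma pvNeed_step_row (m : List (List Int)) (row : Int) (hrow : row < (m.length : Int)) :
    pvNeed m (row + 1) 0 + 1 ≤ pvNeed m row ((PySem.List.pyGetD m row []).length : Int) := by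
  have hL : (PySem.List.pyGetD m (row + 1) []).length ≤ pvMaxLen_sum_matrix m :=
    pyGetD_len_le_maxLen m (row + 1)
  unfold pvNeed
  have e : ((m.length : Int) - row).toNat = ((m.length : Int) - (row + 1)).toNat + 1 := by omega
  rw [e, add_mul, one_mul]
  set a := ((m.length : Int) - (row + 1)).toNat * (pvMaxLen_sum_matrix m + 2) with ha
  omega

lemma pvNeed_step_col (m : List (List Int)) (row col : Int)
    (hcol : col < ((PySem.List.pyGetD m row []).length : Int)) :
    pvNeed m row (col + 1) + 1 = pvNeed m row col := by
  unfold pvNeed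
  omega

lemma pvFuel_sufficient (m : List (List Int)) (row col : Int)
    (h1 : -(m.length : Int) ≤ row) :
    pvNeed m row col ≤ pvFuel_sum_matrix m col := by
  have hL : (PySem.List.pyGetD m row []).length ≤ pvMaxLen_sum_matrix m :=
    pyGetD_len_le_maxLen m row
  have hk : ((m.length : Int) - row).toNat ≤ 2 * m.length := by omega
  have hmul : ((m.length : Int) - row).toNat * (pvMaxLen_sum_matrix m + 2) ≤
      2 * m.length * (pvMaxLen_sum_matrix m + 2) :=
    Nat.mul_le_mul_right _ hk
  unfold pvNeed pvFuel_sum_matrix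
  set a := ((m.length : Int) - row).toNat * (pvMaxLen_sum_matrix m + 2) with ha
  set b := 2 * m.length * (pvMaxLen_sum_matrix m + 2) with hb
  omega

-- B's result as a sum over index ranges
def pvS (m : List (List Int)) (row : Int) (col : Int) : Int :=
  ((PySem.List.pyRange row (m.length : Int) 1).map (fun r =>
    ((PySem.List.pyRange (if r = row then col else 0)
        (((PySem.List.pyGetD m r []).length : Int)) 1).map
      (fun c => PySem.List.pyGetD (PySem.List.pyGetD m r []) c 0)).sum)).sum

lemma pvS_row_end (m : List (List Int)) (col : Int) : pvS m (m.length : Int) col = 0 := by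
  simp [pvS, PySem.List.pyRange_one_eq_nil (le_refl _)]

lemma alt_eq_pvS (m : List (List Int)) (row col : Int) (hne : m ≠ [])
    (h2 : row ≤ (m.length : Int)) :
    sum_matrix_alt m row col = pvS m row col := by
  unfold sum_matrix_alt
  rw [if_neg hne]
  by_cases hr : row = (m.length : Int)
  · rw [if_pos hr, hr, pvS_row_end]
  · have hrow : row < (m.length : Int) := lt_of_le_of_ne h2 hr
    rw [if_neg hr]
    simp only
    rw [PySem.List.foldl_add, PySem.List.foldl_add, zero_add]
    unfold pvS
    rw [PySem.List.pyRange_one_cons hrow, List.map_cons, List.sum_cons, if_pos rfl]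
    congr 1
    refine congrArg List.sum (List.map_congr_left ?_)
    intro r hhr
    have : row + 1 ≤ r := ((PySem.List.mem_pyRange_one).1 hhr).1
    rw [if_neg (by omega)]
    rw [PySem.List.map_pyGetD_pyRange_zero']

lemma pvS_row_step (m : List (List Int)) (row : Int) (hrow : row < (m.length : Int)) :
    pvS m row ((PySem.List.pyGetD m row []).length : Int) = pvS m (row + 1) 0 := by
  unfold pvS
  rw [PySem.List.pyRange_one_cons hrow, List.map_cons, List.sum_cons]
  rw [if_pos rfl, PySem.List.pyRange_one_eq_nil (le_refl _)]
  simp only [List.map_nil, List.sum_nil, zero_add]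
  congr 1
  apply List.map_congr_left
  intro r hr
  have : row + 1 ≤ r := ((PySem.List.mem_pyRange_one).1 hr).1
  rw [if_neg (by omega), ite_self]

lemma pvS_col_step (m : List (List Int)) (row col : Int) (hrow : row < (m.length : Int))
    (hcol : col < ((PySem.List.pyGetD m row []).length : Int)) :
    pvS m row col = PySem.List.pyGetD (PySem.List.pyGetD m row []) col 0 + pvS m row (col + 1) := by
  unfold pvS
  rw [PySem.List.pyRange_one_cons hrow, List.map_cons, List.map_cons, List.sum_cons, List.sum_cons]
  rw [if_pos rfl, if_pos rfl, PySem.List.pyRange_one_cons hcol, List.map_cons, List.sum_cons]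
  rw [add_assoc]
  congr 2
  refine congrArg List.sum (List.map_congr_left ?_)
  intro r hr
  have : row + 1 ≤ r := ((PySem.List.mem_pyRange_one).1 hr).1
  rw [if_neg (by omega), if_neg (by omega)]

lemma sumFuelA_eq_pvS (fuel : Nat) : ∀ (m : List (List Int)) (row col : Int),
    -(m.length : Int) ≤ row → row ≤ (m.length : Int) →
    (row < (m.length : Int) →
      -(((PySem.List.pyGetD m row []).length : Int)) ≤ col ∧
      col ≤ ((PySem.List.pyGetD m row []).length : Int)) →
    pvNeed m row col ≤ fuel →
    sumFuelA fuel m row col = pvS m row col := by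
  induction fuel with
  | zero =>
    intro m row col _ _ _ hfuel
    exfalso
    unfold pvNeed at hfuel
    omega
  | succ fuel ih =>
    intro m row col h1 h2 h3 hfuel
    by_cases hr : row = (m.length : Int)
    · rw [sumFuelA, if_pos hr, hr, pvS_row_end]
    · have hrow : row < (m.length : Int) := lt_of_le_of_ne h2 hr
      rw [sumFuelA, if_neg hr]
      by_cases hc : col = ((PySem.List.pyGetD m row []).length : Int)
      · rw [if_pos hc, hc, pvS_row_step m row hrow]
        apply ih
        · omega
        · omega
        · intro _
          constructor
          · have : (0 : Int) ≤ ((PySem.List.pyGetD m (row + 1) []).length : Int) := by positivity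
            omega
          · positivity
        · have := pvNeed_step_row m row hrow
          rw [hc] at hfuel
          omega
      · have hclt : col < ((PySem.List.pyGetD m row []).length : Int) :=
          lt_of_le_of_ne (h3 hrow).2 hc
        rw [if_neg hc]
        rw [ih m row (col + 1) h1 h2
          (fun h => ⟨by have := (h3 hrow).1; omega, by omega⟩)
          (by have := pvNeed_step_col m row col hclt; omega)]
        exact (pvS_col_step m row col hrow hclt).symm

-- ===== VERDICT (by name: the statement is the Claim_ definition above) =====
theorem sum_matrix_spec : Claim_equal_sum_matrix := by
  intro m row col _ hpre
  obtain ⟨hne, h1, h2, h3⟩ := hpre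
  unfold Spec_sum_matrix sum_matrix
  rw [if_neg hne, alt_eq_pvS m row col hne h2]
  exact sumFuelA_eq_pvS _ m row col h1 h2 h3
    (pvFuel_sufficient m row col h1)
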